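-- pv_equiv track=rewrite | github.com/kiriung/openSourceSoftware | source/Server/subjectTimeChangeFunction.py | returnTimeToInt
-- ===== SOURCE A (Python) =====
-- def returnTimeToInt(char):
--     if char.isdigit():
--         bitmask = 0x00030000
--         for i in range (1, 10):
--             if i == int(char):
--                 return bitmask
--             bitmask >>= 2
--
--     else:
--         bitmask = 0x00038000
--         for i in range(ord('A'), ord('G')):
--             if chr(i) == char:
--                 return bitmask
--             bitmask >>= 3
-- ===== SOURCE B (Python) =====
-- def returnTimeToInt(char):
--     if char.isdigit():
--         d = int(char)
--         if 1 <= d <= 9: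
--             return 0x00030000 >> (2 * (d - 1))
--     else:
--         if len(char) == 1 and 'A' <= char <= 'F':
--             return 0x00038000 >> (3 * (ord(char) - ord('A')))
--     return None
-- ===== Notes on version B (the rewrite author's own statement) =====
-- stated objective: simpler
-- what changed: Replaced both shift-and-scan loops (scan 1..9 / 'A'..'F' while shifting a running bitmask) by a single range check plus one closed-form shift per branch: 0x30000 >> 2*(d-1) for digits, 0x38000 >> 3*(ord(c)-65) for single uppercase letters A-F.
import Mathlib
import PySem

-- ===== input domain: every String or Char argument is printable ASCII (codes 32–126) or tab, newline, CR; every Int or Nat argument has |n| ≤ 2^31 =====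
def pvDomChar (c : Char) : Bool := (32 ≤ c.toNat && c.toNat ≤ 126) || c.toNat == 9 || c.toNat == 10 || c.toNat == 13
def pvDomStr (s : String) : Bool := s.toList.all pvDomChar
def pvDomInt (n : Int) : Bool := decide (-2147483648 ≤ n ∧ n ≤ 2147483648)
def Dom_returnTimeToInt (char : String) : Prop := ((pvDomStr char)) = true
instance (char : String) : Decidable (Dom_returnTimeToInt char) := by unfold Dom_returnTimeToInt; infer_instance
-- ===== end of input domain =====

-- B replaces A's shift-and-scan loops by direct arithmetic: one range check plus one closed-form shift per branch (objective: simpler).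

-- ===== PORT A =====
-- the digit-branch loop: for i in range(1,10): if i == int(char): return bitmask; bitmask >>= 2
def pvLoopA (n : Int) : List Int → Int → Option Int
  | [], _ => none
  | i :: rest, bm => if i = n then some bm else pvLoopA n rest (bm >>> 2)

-- the letter-branch loop: for i in range(ord('A'), ord('G')): if chr(i) == char: return bitmask; bitmask >>= 3
def pvLoopB (s : String) : List Int → Int → Option Int
  | [], _ => none
  | i :: rest, bm => if String.ofList [Char.ofNat i.toNat] = s then some bm else pvLoopB s rest (bm >>> 3)

def returnTimeToInt (char : String) : Option Int :=
  if PySem.Str.strIsdigit char then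
    -- int(char): exact — on an ASCII isdigit string int() never raises, so ofStr? is some here
    match PySem.Int.ofStr? char with
    | some n => pvLoopA n (PySem.List.pyRange 1 10 1) 0x00030000
    | none => none
  else
    pvLoopB char (PySem.List.pyRange 65 71 1) 0x00038000

-- ===== PORT B =====
def returnTimeToInt_alt (char : String) : Option Int :=
  if PySem.Str.strIsdigit char then
    match PySem.Int.ofStr? char with
    | some d => if 1 ≤ d ∧ d ≤ 9 then some ((0x00030000 : Int) >>> (2 * (d - 1)).toNat) else none
    | none => none
  else
    match char.toList with
    | [c] => if 'A' ≤ c ∧ c ≤ 'F' then some ((0x00038000 : Int) >>> (3 * (c.toNat - 65))) else none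
    | _ => none

-- ===== PRECONDITION & SPEC =====
def Spec_returnTimeToInt (char : String) (out : Option Int) : Prop := out = returnTimeToInt_alt char
instance (char : String) (out : Option Int) : Decidable (Spec_returnTimeToInt char out) := by unfold Spec_returnTimeToInt; infer_instance

-- ===== CLAIM (what is proved, stated in full; the proofs are below) =====
def Claim_equal_returnTimeToInt : Prop := ∀ (char : String), Dom_returnTimeToInt char → Spec_returnTimeToInt char (returnTimeToInt char)

-- ===== LEMMAS AND PROOFS =====

lemma pyRange_digits : PySem.List.pyRange 1 10 1 = [1,2,3,4,5,6,7,8,9] := by decide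

lemma pyRange_letters : PySem.List.pyRange 65 71 1 = [65,66,67,68,69,70] := by decide

lemma loopA_eq (d : Int) :
    pvLoopA d [1,2,3,4,5,6,7,8,9] 0x00030000 =
      (if 1 ≤ d ∧ d ≤ 9 then some ((0x00030000 : Int) >>> (2 * (d - 1)).toNat) else none) := by
  by_cases h : 1 ≤ d ∧ d ≤ 9
  · obtain ⟨h1, h2⟩ := h
    interval_cases d <;> decide
  · rw [if_neg h]
    simp only [pvLoopA]
    split_ifs <;> first | rfl | omega

lemma char_eq_of_toNat (c d : Char) (h : c.toNat = d.toNat) : c = d :=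
  Char.ext (UInt32.toNat_inj.mp h)

lemma ofList_eq_iff_single (c : Char) (s : String) (hs : s.toList = [c]) (d : Char) :
    (String.ofList [d] = s) ↔ d = c := by
  constructor
  · intro h
    have := congrArg String.toList h
    simp [hs] at this
    exact this
  · rintro rfl
    rw [← hs, String.ofList_toList]

lemma loopB_eq (s : String) :
    pvLoopB s [65,66,67,68,69,70] 0x00038000 =
      (match s.toList with
       | [c] => if 'A' ≤ c ∧ c ≤ 'F' then some ((0x00038000 : Int) >>> (3 * (c.toNat - 65))) else none
       | _ => none) := by
  match hl : s.toList with
  | [] =>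
    simp only [pvLoopB]
    split_ifs with h1 h2 h3 h4 h5 h6 <;>
      first
      | rfl
      | (exfalso; have := congrArg String.toList ‹String.ofList _ = s›; simp [hl] at this)
  | c :: c2 :: rest =>
    simp only [pvLoopB]
    split_ifs with h1 h2 h3 h4 h5 h6 <;>
      first
      | rfl
      | (exfalso; have := congrArg String.toList ‹String.ofList _ = s›; simp [hl] at this)
  | [c] =>
    simp only [pvLoopB, ofList_eq_iff_single c s hl]
    have hA : ('A' ≤ c) ↔ 65 ≤ c.toNat := by
      rw [Char.le_def, UInt32.le_iff_toNat_le]; rfl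
    have hF : (c ≤ 'F') ↔ c.toNat ≤ 70 := by
      rw [Char.le_def, UInt32.le_iff_toNat_le]; rfl
    by_cases e1 : c = 'A'
    · subst e1; decide
    by_cases e2 : c = 'B'
    · subst e2; decide
    by_cases e3 : c = 'C'
    · subst e3; decide
    by_cases e4 : c = 'D'
    · subst e4; decide
    by_cases e5 : c = 'E'
    · subst e5; decide
    by_cases e6 : c = 'F'
    · subst e6; decide
    have n1 : c.toNat ≠ 65 := fun h => e1 (char_eq_of_toNat c 'A' h)
    have n2 : c.toNat ≠ 66 := fun h => e2 (char_eq_of_toNat c 'B' h)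
    have n3 : c.toNat ≠ 67 := fun h => e3 (char_eq_of_toNat c 'C' h)
    have n4 : c.toNat ≠ 68 := fun h => e4 (char_eq_of_toNat c 'D' h)
    have n5 : c.toNat ≠ 69 := fun h => e5 (char_eq_of_toNat c 'E' h)
    have n6 : c.toNat ≠ 70 := fun h => e6 (char_eq_of_toNat c 'F' h)
    have hcond : ¬ ('A' ≤ c ∧ c ≤ 'F') := by
      rw [hA, hF]; omega
    rw [if_neg hcond]
    split_ifs with g1 g2 g3 g4 g5 g6
    · exact absurd (by rw [← g1]; decide : c = 'A') e1
    · exact absurd (by rw [← g2]; decide : c = 'B') e2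
    · exact absurd (by rw [← g3]; decide : c = 'C') e3
    · exact absurd (by rw [← g4]; decide : c = 'D') e4
    · exact absurd (by rw [← g5]; decide : c = 'E') e5
    · exact absurd (by rw [← g6]; decide : c = 'F') e6
    · rfl

-- ===== VERDICT (by name: the statement is the Claim_ definition above) =====
theorem returnTimeToInt_spec : Claim_equal_returnTimeToInt := by
  intro char _hdom
  unfold Spec_returnTimeToInt returnTimeToInt returnTimeToInt_alt
  by_cases hd : PySem.Str.strIsdigit char
  · rw [if_pos hd, if_pos hd]
    cases PySem.Int.ofStr? char with
    | none => rfl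
    | some d => dsimp only; rw [pyRange_digits, loopA_eq]
  · rw [if_neg hd, if_neg hd, pyRange_letters, loopB_eq]
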